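-- pv_equiv track=rewrite | github.com/moisesocosta/Faculdade | Lógica/Trabalho-3/TrabalhoDeLogica3-2sat.py | simplifica
-- ===== SOURCE A (Python) =====
-- def simplifica(C):
--
--     #caso c for um conjunto vazio
--     if C == [[]]:
--         return C
--     if C == []:
--         return C
--
--     else:
--         #Lema clausula unitaria positiva
--         x = 0
--         for i in range(len(C)):
--
--             #procura por fatos veridicos
--             if len(C[i]) == 1:
--                 fato = C[i][0]
--                 x = 1
--                 break
--
--         #se C não contem fatos (Lema 1)
--         if x == 0:
--             return C
--
--         #se C tem fatos então fazer operações (Lema 2)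
--         else:
--
--             Clinha = []
--
--             for clausula in C:
--                 if (fato*-1) in clausula:
--                     clausula.remove(fato*-1)
--                     Clinha.append(clausula)
--
--                 elif fato not in clausula:
--                     Clinha.append(clausula)
--
--
--             return simplifica(Clinha)
-- ===== SOURCE B (Python) =====
-- def simplifica(C):
--     # Iterative unit propagation: one fused pass per round rebuilds the clause
--     # list while recording the next unit literal (no separate search pass, no
--     # recursion). Like A it mutates clauses in place via list.remove; the
--     # equivalence claimed is about the return value.
--     fato = None
--     for cl in C:
--         if len(cl) == 1:
--             fato = cl[0]
--             break
--     while fato is not None: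
--         new = []
--         nxt = None
--         for cl in C:
--             if -fato in cl:
--                 cl.remove(-fato)
--                 new.append(cl)
--             elif fato in cl:
--                 continue
--             else:
--                 new.append(cl)
--             if nxt is None and len(cl) == 1:
--                 nxt = cl[0]
--         C = new
--         fato = nxt
--     return C
-- ===== Notes on version B (the rewrite author's own statement) =====
-- stated objective: alternative
-- what changed: A's recursion, which re-scans the whole clause list for a unit clause before a second rebuilding pass each round, is replaced by an iterative while-loop whose single fused pass per round rebuilds the list and simultaneously records the next unit literal, eliminating the separate search pass and the recursion (and the special-case tests for [] and [[]]).
import Mathlib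
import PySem

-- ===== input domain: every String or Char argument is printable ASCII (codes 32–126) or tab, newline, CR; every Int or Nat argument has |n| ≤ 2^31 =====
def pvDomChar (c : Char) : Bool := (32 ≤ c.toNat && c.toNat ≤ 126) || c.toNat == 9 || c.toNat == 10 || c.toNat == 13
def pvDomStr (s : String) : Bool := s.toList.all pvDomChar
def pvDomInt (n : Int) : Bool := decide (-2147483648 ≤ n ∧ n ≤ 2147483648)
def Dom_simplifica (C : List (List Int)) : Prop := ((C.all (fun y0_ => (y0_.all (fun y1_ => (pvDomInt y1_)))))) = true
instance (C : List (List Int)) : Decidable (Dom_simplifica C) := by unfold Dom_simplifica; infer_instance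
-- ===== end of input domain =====

-- ===== PORT A =====
-- B is an iterative re-decomposition of A: each round's rebuild pass also records the next unit literal,
-- so no separate unit-search pass and no recursion. Both Pythons mutate clauses in place (list.remove);
-- the equivalence proved here is about the return value.

-- sum of clause lengths; termination measure for A's recursion
def sumLen (C : List (List Int)) : Nat := (C.map List.length).sum

-- A's first loop: scan for the first unit clause, returning its literal (fato)
def findFact : List (List Int) → Option Int
  | [] => none
  | cl :: rest => if cl.length = 1 then some cl.headI else findFact rest

-- A's second loop: one propagation round for literal f (clausula.remove(fato*-1) = erase, exact since -f ∈ cl)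
def propagate (f : Int) : List (List Int) → List (List Int)
  | [] => []
  | cl :: rest =>
    if (f * -1) ∈ cl then (cl.erase (f * -1)) :: propagate f rest
    else if f ∈ cl then propagate f rest
    else cl :: propagate f rest

theorem sumLen_propagate_le (f : Int) (C : List (List Int)) : sumLen (propagate f C) ≤ sumLen C := by
  induction C with
  | nil => simp [propagate]
  | cons cl rest ih =>
    simp only [propagate]
    split_ifs with h1 h2
    · have hl := List.length_erase_of_mem h1
      simp [sumLen, List.map] at ih hl ⊢
      omega
    · simp [sumLen, List.map] at ih ⊢; omega
    · simp [sumLen, List.map] at ih ⊢; omega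

theorem sumLen_propagate_lt (f : Int) (C : List (List Int)) (h : findFact C = some f) :
    sumLen (propagate f C) < sumLen C := by
  induction C with
  | nil => simp [findFact] at h
  | cons cl rest ih =>
    simp only [findFact] at h
    by_cases hu : cl.length = 1
    · obtain ⟨a, rfl⟩ : ∃ a, cl = [a] := by
        match cl, hu with
        | [a], _ => exact ⟨a, rfl⟩
      simp at h
      subst h
      have hle := sumLen_propagate_le a rest
      simp only [propagate]
      by_cases hz : (a * -1) ∈ [a]
      · rw [if_pos hz]
        have he : [a].erase (a * -1) = [] := by
          simp only [List.mem_singleton] at hz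
          rw [hz]; simp
        rw [he]
        simp [sumLen, List.map] at hle ⊢
        omega
      · have hmem : a ∈ [a] := by simp
        rw [if_neg hz, if_pos hmem]
        simp [sumLen, List.map] at hle ⊢
        omega
    · rw [if_neg hu] at h
      have hlt := ih h
      simp only [propagate]
      split_ifs with h1 h2
      · have hl := List.length_erase_of_mem h1
        simp [sumLen, List.map] at hlt hl ⊢
        omega
      · simp [sumLen, List.map] at hlt ⊢; omega
      · simp [sumLen, List.map] at hlt ⊢; omega

-- port of A (recursive; termination by the strictly decreasing total literal count)
def simplifica (C : List (List Int)) : List (List Int) :=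
  if C = [[]] then C
  else if C = [] then C
  else
    match h : findFact C with
    | none => C
    | some fato => simplifica (propagate fato C)
termination_by sumLen C
decreasing_by exact sumLen_propagate_lt fato C h

-- ===== PORT B =====
-- B's inner loop: one fused pass that rebuilds the clause list AND records the first unit
-- literal (nxt) among the kept clauses
def propStep (fato : Int) : List (List Int) → List (List Int) × Option Int
  | [] => ([], none)
  | cl :: rest =>
    let r := propStep fato rest
    if (-fato) ∈ cl then
      let cl' := cl.erase (-fato)
      (cl' :: r.1, if cl'.length = 1 then some cl'.headI else r.2)
    else if fato ∈ cl then r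
    else (cl :: r.1, if cl.length = 1 then some cl.headI else r.2)

-- B's initial scan for the first unit clause
def firstUnit : List (List Int) → Option Int
  | [] => none
  | cl :: rest => if cl.length = 1 then some cl.headI else firstUnit rest

-- B's while-loop; fuel = sumLen C + 1 is a totality guard only (the loop in Source B needs no fuel:
-- each iteration removes at least one literal, as proved below)
def loopB : Nat → Option Int → List (List Int) → List (List Int)
  | _, none, C => C
  | 0, some _, C => C
  | fuel + 1, some fato, C =>
    let r := propStep fato C
    loopB fuel r.2 r.1

def simplifica_alt (C : List (List Int)) : List (List Int) :=
  loopB (sumLen C + 1) (firstUnit C) C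

-- ===== PRECONDITION & SPEC =====
def Spec_simplifica (C : List (List Int)) (out : List (List Int)) : Prop := out = simplifica_alt C
instance (C : List (List Int)) (out : List (List Int)) : Decidable (Spec_simplifica C out) := by unfold Spec_simplifica; infer_instance

-- ===== CLAIM (what is proved, stated in full; the proofs are below) =====
def Claim_equal_simplifica : Prop := ∀ (C : List (List Int)), Dom_simplifica C → Spec_simplifica C (simplifica C)

-- ===== LEMMAS AND PROOFS =====

theorem firstUnit_eq_findFact (C : List (List Int)) : firstUnit C = findFact C := by
  induction C with
  | nil => rfl
  | cons cl rest ih => simp [firstUnit, findFact, ih]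

-- B's fused pass computes A's round together with the first unit clause of the NEW list
theorem propStep_eq (f : Int) (C : List (List Int)) :
    propStep f C = (propagate f C, findFact (propagate f C)) := by
  induction C with
  | nil => rfl
  | cons cl rest ih =>
    simp only [propStep, propagate, ih, mul_neg_one]
    by_cases h1 : (-f) ∈ cl
    · rw [if_pos h1, if_pos h1]
      simp [findFact]
    · rw [if_neg h1, if_neg h1]
      by_cases h2 : f ∈ cl
      · simp [h2]
      · simp [h2, findFact]

-- A's two leading equality tests are subsumed by findFact = none there
theorem simplifica_eq_match (C : List (List Int)) :
    simplifica C = match findFact C with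
                   | none => C
                   | some fato => simplifica (propagate fato C) := by
  rw [simplifica]
  by_cases h1 : C = [[]]
  · subst h1; simp [findFact]
  · by_cases h2 : C = []
    · subst h2; simp [findFact]
    · simp only [if_neg h1, if_neg h2]
      cases hf : findFact C <;> simp

theorem loopB_eq_simplifica (n : Nat) : ∀ (C : List (List Int)), sumLen C < n →
    loopB n (findFact C) C = simplifica C := by
  induction n with
  | zero => intro C h; omega
  | succ n ih =>
    intro C h
    rw [simplifica_eq_match]
    cases hf : findFact C with
    | none => rfl
    | some fato =>
      rw [loopB]
      simp only [propStep_eq]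
      exact ih (propagate fato C) (by have := sumLen_propagate_lt fato C hf; omega)

-- ===== VERDICT (by name: the statement is the Claim_ definition above) =====
theorem simplifica_spec : Claim_equal_simplifica := by
  intro C _
  unfold Spec_simplifica simplifica_alt
  rw [firstUnit_eq_findFact]
  exact (loopB_eq_simplifica (sumLen C + 1) C (by omega)).symm
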